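-- pv_equiv track=rewrite | github.com/rreubenleon/semaforo-legislativo | main.py | invertir_nombre
-- ===== SOURCE A (Python) =====
-- def invertir_nombre(nombre):
--     """
--     Invierte nombres del formato SITL 'Apellido1 Apellido2 Nombre(s)'
--     al formato natural 'Nombre(s) Apellido1 Apellido2'.
--
--     Heuristica:
--     - Si tiene 3 palabras: asume 2 apellidos + 1 nombre
--     - Si tiene 4+ palabras: asume 2 apellidos + resto nombres
--     - Maneja apellidos compuestos con particulas (De, Del, De La, De Los, etc.)
--     """
--     if not nombre or not nombre.strip():
--         return nombre
--
--     partes = nombre.strip().split()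
--     if len(partes) <= 2:
--         return nombre  # No se puede determinar, dejarlo como esta
--
--     # Detectar particulas de apellido compuesto al inicio
--     # Ej: "De La Cruz Garcia Maria" -> apellidos = "De La Cruz Garcia", nombre = "Maria"
--     particulas = {"de", "del", "la", "las", "los", "el", "san", "santa", "van", "von"}
--
--     # Contar cuantas palabras son apellidos (minimo 2, pero puede haber particulas)
--     idx_apellido_fin = 0
--     i = 0
--     apellidos_contados = 0
--     while i < len(partes) and apellidos_contados < 2:
--         if partes[i].lower() in particulas:
--             # Es particula, avanzar sin contar como apellido completo
--             i += 1
--             continue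
--         else:
--             apellidos_contados += 1
--             i += 1
--             idx_apellido_fin = i
--
--     # Si consumimos todo, no hay nombre para invertir
--     if idx_apellido_fin >= len(partes):
--         return nombre
--
--     apellidos = " ".join(partes[:idx_apellido_fin])
--     nombres = " ".join(partes[idx_apellido_fin:])
--
--     return f"{nombres} {apellidos}"
-- ===== SOURCE B (Python) =====
-- def invertir_nombre(nombre):
--     if not nombre or not nombre.strip():
--         return nombre
--     partes = nombre.strip().split()
--     if len(partes) <= 2:
--         return nombre
--     particulas = {"de", "del", "la", "las", "los", "el", "san", "santa", "van", "von"}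
--
--     def split2(ws, count):
--         # structurally splits ws into (apellidos, nombres): apellidos ends after
--         # the second non-particle word; trailing particles with no surname after
--         # them belong to nombres.
--         if count == 2 or not ws:
--             return [], list(ws)
--         w, rest = ws[0], ws[1:]
--         if w.lower() in particulas:
--             a, n = split2(rest, count)
--             return ([w] + a, n) if a else ([], [w] + n)
--         a, n = split2(rest, count + 1)
--         return [w] + a, n
--
--     apellidos, nombres = split2(partes, 0)
--     if not nombres:
--         return nombre
--     return f"{' '.join(nombres)} {' '.join(apellidos)}"
-- ===== Notes on version B (the rewrite author's own statement) =====
-- stated objective: alternative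
-- what changed: Replaces A's index-counting while-loop plus slicing by a structural recursion that builds the apellidos and nombres word lists directly (deciding per word which side it belongs to, trailing particles falling to nombres), with no index arithmetic or slicing.
import Mathlib
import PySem

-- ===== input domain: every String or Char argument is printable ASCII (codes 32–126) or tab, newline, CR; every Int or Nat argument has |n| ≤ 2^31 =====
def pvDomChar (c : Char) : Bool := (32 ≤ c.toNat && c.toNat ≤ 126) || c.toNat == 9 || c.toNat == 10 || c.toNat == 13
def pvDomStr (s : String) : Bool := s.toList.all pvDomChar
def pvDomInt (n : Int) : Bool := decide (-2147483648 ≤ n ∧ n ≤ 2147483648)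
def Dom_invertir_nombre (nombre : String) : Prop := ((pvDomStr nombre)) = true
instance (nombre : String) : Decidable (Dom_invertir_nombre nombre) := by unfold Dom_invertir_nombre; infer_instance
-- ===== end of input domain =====

-- B splits the word list by a structural recursion that builds the apellidos and nombres lists directly, instead of A's index-counting loop plus slicing; same cost, different decomposition.

-- shared constant (the particle set literal of both Pythons)
def pvParticulas : PySem.Set String :=
  PySem.Set.ofList ["de", "del", "la", "las", "los", "el", "san", "santa", "van", "von"]

-- ===== PORT A =====
-- A's while-loop: i, apellidos_contados, idx_apellido_fin carried as arguments
def pvLoopA : List String → Int → Nat → Int → Int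
  | [], _, _, fin => fin
  | p :: rest, i, count, fin =>
    if count < 2 then
      if PySem.Str.lower p ∈ pvParticulas then pvLoopA rest (i + 1) count fin
      else pvLoopA rest (i + 1) (count + 1) (i + 1)
    else fin

def invertir_nombre (nombre : String) : String :=
  if nombre = "" ∨ PySem.Str.strip nombre = "" then nombre
  else
    let partes := PySem.Str.split₀ (PySem.Str.strip nombre)
    if partes.length ≤ 2 then nombre
    else
      let fin := pvLoopA partes 0 0 0
      if (partes.length : Int) ≤ fin then nombre
      else
        let apellidos := PySem.Str.join " " (PySem.List.slice partes none (some fin))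
        let nombres := PySem.Str.join " " (PySem.List.slice partes (some fin) none)
        nombres ++ " " ++ apellidos

-- ===== PORT B =====
-- B's recursive split2(ws, count): builds (apellidos, nombres) structurally
def pvSplit2 : List String → Nat → List String × List String
  | [], _ => ([], [])
  | w :: rest, count =>
    if count == 2 then ([], w :: rest)
    else if PySem.Str.lower w ∈ pvParticulas then
      match pvSplit2 rest count with
      | ([], n) => ([], w :: n)
      | (a, n) => (w :: a, n)
    else
      match pvSplit2 rest (count + 1) with
      | (a, n) => (w :: a, n)

def invertir_nombre_alt (nombre : String) : String :=
  if nombre = "" ∨ PySem.Str.strip nombre = "" then nombre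
  else
    let partes := PySem.Str.split₀ (PySem.Str.strip nombre)
    if partes.length ≤ 2 then nombre
    else
      let an := pvSplit2 partes 0
      if an.2 = [] then nombre
      else PySem.Str.join " " an.2 ++ " " ++ PySem.Str.join " " an.1

-- ===== PRECONDITION & SPEC =====
def Spec_invertir_nombre (nombre : String) (out : String) : Prop := out = invertir_nombre_alt nombre
instance (nombre : String) (out : String) : Decidable (Spec_invertir_nombre nombre out) := by unfold Spec_invertir_nombre; infer_instance

-- ===== CLAIM =====
def Claim_equal_invertir_nombre : Prop := ∀ (nombre : String), Dom_invertir_nombre nombre → Spec_invertir_nombre nombre (invertir_nombre nombre)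

-- ===== LEMMAS AND PROOFS =====

lemma pvSplit2_append (l : List String) (count : Nat) :
    (pvSplit2 l count).1 ++ (pvSplit2 l count).2 = l := by
  induction l generalizing count with
  | nil => simp [pvSplit2]
  | cons w rest ih =>
    simp only [pvSplit2]
    split_ifs with h1 h2
    · simp
    · rcases he : pvSplit2 rest count with ⟨a, n⟩
      cases a with
      | nil => simpa using (by simpa [he] using ih count)
      | cons x xs => simpa using (by simpa [he] using ih count)
    · rcases he : pvSplit2 rest (count + 1) with ⟨a, n⟩
      simpa using (by simpa [he] using ih (count + 1))

lemma pvLoopA_two (l : List String) (i : Int) (f : Int) :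
    pvLoopA l i 2 f = f := by
  cases l <;> simp [pvLoopA]

lemma pvLoopA_eq_split2 (l : List String) (count : Nat) (i f : Int) (hc : count < 2) :
    pvLoopA l i count f =
      if (pvSplit2 l count).1 = [] then f else i + ((pvSplit2 l count).1.length : Int) := by
  induction l generalizing count i f with
  | nil => simp [pvLoopA, pvSplit2]
  | cons w rest ih =>
    have hne : ¬ (count == 2) = true := by simp; omega
    by_cases hp : PySem.Str.lower w ∈ pvParticulas
    · rw [show pvLoopA (w :: rest) i count f = pvLoopA rest (i + 1) count f by
        simp [pvLoopA, hc, hp]]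
      rw [ih count (i + 1) f hc]
      simp only [pvSplit2, if_neg hne, if_pos hp]
      rcases he : pvSplit2 rest count with ⟨a, n⟩
      cases a with
      | nil => simp
      | cons x xs =>
        simp
        ring
    · rw [show pvLoopA (w :: rest) i count f = pvLoopA rest (i + 1) (count + 1) (i + 1) by
        simp [pvLoopA, hc, hp]]
      simp only [pvSplit2, if_neg hne, if_neg hp]
      rcases he : pvSplit2 rest (count + 1) with ⟨a, n⟩
      by_cases h2 : count + 1 = 2
      · have hc1 : count = 1 := by omega
        subst hc1
        rw [pvLoopA_two]
        have ha : a = [] := by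
          have h := he
          cases rest <;> simp [pvSplit2] at h <;> simp [← h.1]
        simp [ha]
      · have hc' : count + 1 < 2 := by omega
        rw [ih (count + 1) (i + 1) (i + 1) hc']
        simp [he]
        cases a with
        | nil => simp
        | cons x xs =>
          simp
          ring

-- ===== VERDICT =====
theorem invertir_nombre_spec : Claim_equal_invertir_nombre := by
  intro nombre _
  show invertir_nombre nombre = invertir_nombre_alt nombre
  by_cases h1 : nombre = "" ∨ PySem.Str.strip nombre = ""
  · rw [invertir_nombre, invertir_nombre_alt, if_pos h1, if_pos h1]
  · simp only [invertir_nombre, invertir_nombre_alt, if_neg h1]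
    by_cases h2 : (PySem.Str.split₀ (PySem.Str.strip nombre)).length ≤ 2
    · simp only [if_pos h2]
    · simp only [if_neg h2]
      rcases he : pvSplit2 (PySem.Str.split₀ (PySem.Str.strip nombre)) 0 with ⟨a, n⟩
      have happ : a ++ n = PySem.Str.split₀ (PySem.Str.strip nombre) := by
        have h := pvSplit2_append (PySem.Str.split₀ (PySem.Str.strip nombre)) 0
        rw [he] at h; exact h
      have hfin : pvLoopA (PySem.Str.split₀ (PySem.Str.strip nombre)) 0 0 0 = (a.length : Int) := by
        have h := pvLoopA_eq_split2 (PySem.Str.split₀ (PySem.Str.strip nombre)) 0 0 0 (by omega)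
        rw [he] at h
        rcases a with _ | ⟨x, xs⟩ <;> simpa using h
      have hlen : (PySem.Str.split₀ (PySem.Str.strip nombre)).length = a.length + n.length := by
        rw [← happ]; simp
      rw [hfin]
      by_cases hn : n = []
      · have hg : ((PySem.Str.split₀ (PySem.Str.strip nombre)).length : Int) ≤ (a.length : Int) := by
          rw [hlen, hn]; simp
        simp only [if_pos hg]
        simp [hn]
      · have hg : ¬ ((PySem.Str.split₀ (PySem.Str.strip nombre)).length : Int) ≤ (a.length : Int) := by
          rw [hlen]
          have : 0 < n.length := List.length_pos_iff.mpr hn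
          push_cast; omega
        simp only [if_neg hg]
        have hs1 : PySem.List.slice (PySem.Str.split₀ (PySem.Str.strip nombre)) none (some (a.length : Int)) = a := by
          rw [← happ, PySem.List.slice_to_natCast]
          exact List.take_left ..
        have hs2 : PySem.List.slice (PySem.Str.split₀ (PySem.Str.strip nombre)) (some (a.length : Int)) none = n := by
          rw [← happ, PySem.List.slice_from_natCast]
          exact List.drop_left ..
        simp [hn, hs1, hs2]
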